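-- pv_equiv track=rewrite | github.com/wzygxr/shuati | class173_SqrtDecompositionAndMoAlgorithm/toom_cook_multiplication.py | divide_by_six
-- ===== SOURCE A (Python) =====
-- def divide_by_six(arr):
--     """
--     将数字列表除以6
--
--     Args:
--         arr: 数字列表（低位在前）
--
--     Returns:
--         list: 结果列表（低位在前）
--     """
--     result = [0] * len(arr)
--     remainder = 0
--
--     # 从高位开始除（列表的末尾）
--     for i in range(len(arr) - 1, -1, -1):
--         current = arr[i] + remainder * 10
--         result[i] = current // 6
--         remainder = current % 6
--
--     # 移除前导零
--     last_non_zero = len(result) - 1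
--     while last_non_zero > 0 and result[last_non_zero] == 0:
--         last_non_zero -= 1
--
--     return result[:last_non_zero + 1]
-- ===== SOURCE B (Python) =====
-- def divide_by_six(arr):
--     # Two-stage long division: divide by 2, then divide the intermediate by 3.
--     half = [0] * len(arr)
--     r = 0
--     for i in range(len(arr) - 1, -1, -1):
--         cur = arr[i] + r * 10
--         half[i] = cur // 2
--         r = cur % 2
--     result = [0] * len(arr)
--     r = 0
--     for i in range(len(arr) - 1, -1, -1):
--         cur = half[i] + r * 10
--         result[i] = cur // 3
--         r = cur % 3
--     n = len(result)
--     while n > 1 and result[n - 1] == 0: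
--         n -= 1
--     return result[:n]
-- ===== Notes on version B (the rewrite author's own statement) =====
-- stated objective: alternative
-- what changed: B replaces A's single long-division-by-6 pass by two long-division passes (divide by 2, then divide the intermediate digit list by 3), relying on floor(floor(N/2)/3)=floor(N/6) holding digit-wise for the carry decomposition r=2t+s.
import Mathlib
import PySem

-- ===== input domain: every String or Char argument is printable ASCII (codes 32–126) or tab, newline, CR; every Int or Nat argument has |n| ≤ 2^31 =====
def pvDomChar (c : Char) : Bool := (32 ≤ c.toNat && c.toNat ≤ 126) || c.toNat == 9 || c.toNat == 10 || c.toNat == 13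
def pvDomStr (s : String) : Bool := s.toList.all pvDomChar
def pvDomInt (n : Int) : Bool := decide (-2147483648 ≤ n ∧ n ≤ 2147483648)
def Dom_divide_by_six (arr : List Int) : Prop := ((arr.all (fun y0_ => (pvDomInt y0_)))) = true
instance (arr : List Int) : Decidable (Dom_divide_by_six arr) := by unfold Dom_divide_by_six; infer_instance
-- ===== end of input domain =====

-- B replaces A's single divide-by-6 long-division pass by two passes (divide by 2, then by 3); alternative decomposition, same O(n) cost.

-- ===== PORT A =====
-- A's high-to-low loop: the tail of the low-first list holds the high digits, so it is processed first.
def pvPass6 : List Int → Int → List Int × Int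
  | [], r => ([], r)
  | a :: rest, r =>
    let (res, r') := pvPass6 rest r
    let cur := a + r' * 10
    (PySem.Int.floordiv cur 6 :: res, PySem.Int.mod cur 6)

-- A's while loop: last_non_zero scanning down from index m
def pvLnz (res : List Int) : Nat → Nat
  | 0 => 0
  | k + 1 => if res.getD (k + 1) 0 = 0 then pvLnz res k else k + 1

def divide_by_six (arr : List Int) : List Int :=
  let (result, _) := pvPass6 arr 0
  result.take (pvLnz result (result.length - 1) + 1)

-- ===== PORT B =====
def pvPass2 : List Int → Int → List Int × Int
  | [], r => ([], r)
  | a :: rest, r =>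
    let (res, r') := pvPass2 rest r
    let cur := a + r' * 10
    (PySem.Int.floordiv cur 2 :: res, PySem.Int.mod cur 2)

def pvPass3 : List Int → Int → List Int × Int
  | [], r => ([], r)
  | a :: rest, r =>
    let (res, r') := pvPass3 rest r
    let cur := a + r' * 10
    (PySem.Int.floordiv cur 3 :: res, PySem.Int.mod cur 3)

-- B's while loop: n scanning down from res.length, staying ≥ 1
def pvStripN (res : List Int) : Nat → Nat
  | 0 => 0
  | 1 => 1
  | k + 2 => if res.getD (k + 1) 0 = 0 then pvStripN res (k + 1) else k + 2

def divide_by_six_alt (arr : List Int) : List Int :=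
  let (half, _) := pvPass2 arr 0
  let (result, _) := pvPass3 half 0
  result.take (pvStripN result result.length)

-- ===== PRECONDITION & SPEC =====
def Spec_divide_by_six (arr : List Int) (out : List Int) : Prop := out = divide_by_six_alt arr
instance (arr : List Int) (out : List Int) : Decidable (Spec_divide_by_six arr out) := by unfold Spec_divide_by_six; infer_instance

-- ===== CLAIM (what is proved, stated in full; the proofs are below) =====
def Claim_equal_divide_by_six : Prop := ∀ (arr : List Int), Dom_divide_by_six arr → Spec_divide_by_six arr (divide_by_six arr)

-- ===== LEMMAS AND PROOFS =====

theorem pvPass6_eq (arr : List Int) : ∀ (s t : Int),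
    pvPass6 arr (2 * t + s)
      = ((pvPass3 (pvPass2 arr s).1 t).1,
         2 * (pvPass3 (pvPass2 arr s).1 t).2 + (pvPass2 arr s).2) := by
  induction arr with
  | nil => intro s t; simp [pvPass6, pvPass2, pvPass3]
  | cons a rest ih =>
    intro s t
    simp only [pvPass6, pvPass2, pvPass3, ih s t]
    refine Prod.ext (by simp; omega) (by simp; omega)

theorem pvStrip_eq (res : List Int) : ∀ (m : Nat),
    pvStripN res (m + 1) = pvLnz res m + 1 := by
  intro m
  induction m with
  | zero => simp [pvStripN, pvLnz]
  | succ k ih =>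
    show pvStripN res (k + 2) = _
    simp only [pvStripN, pvLnz, ih]
    split <;> rfl

-- ===== VERDICT (by name: the statement is the Claim_ definition above) =====
theorem divide_by_six_spec : Claim_equal_divide_by_six := by
  intro arr _
  show divide_by_six arr = divide_by_six_alt arr
  have h6 := pvPass6_eq arr 0 0
  norm_num at h6
  simp only [divide_by_six, divide_by_six_alt, h6]
  cases hres : (pvPass3 (pvPass2 arr 0).1 0).1 with
  | nil => rfl
  | cons b bs =>
    simp only [List.length_cons, Nat.add_sub_cancel, pvStrip_eq]
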